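-- pv_equiv track=rewrite | github.com/AmyLinck/FEA | topology.py | nominate_arbiters
-- ===== SOURCE A (Python) =====
-- def nominate_arbiters(factors):
--     assignments = {}
--     for i, factor in enumerate(factors[:-1]):
--         for j in factor:
--             if j not in factors[i + 1] and j not in assignments:
--                 assignments[j] = i
--     for j in factors[-1]:
--         if j not in assignments:
--             assignments[j] = len(factors) - 1
--     keys = list(assignments.keys())
--     keys.sort()
--     arbiters = [assignments[k] for k in keys]
--     return arbiters
-- ===== SOURCE B (Python) =====
-- def nominate_arbiters(factors):
--     n = len(factors)
--     occ = {}
--     for i, factor in enumerate(factors):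
--         for j in factor:
--             occ.setdefault(j, set()).add(i)
--     result = []
--     for j in sorted(occ):
--         cand = [i for i in occ[j] if i == n - 1 or (i + 1) not in occ[j]]
--         if cand:
--             result.append(min(cand))
--     return result
-- ===== Notes on version B (the rewrite author's own statement) =====
-- stated objective: faster
-- what changed: A walks adjacent factor pairs (with a special-cased last-factor loop) and answers each 'j not in factors[i+1]' by an O(|factor|) list scan; B instead builds one inverted index (element -> set of factor indices) in a single uniform pass and reads each element's arbiter off its index set as a minimum qualifying index, with no per-occurrence list scans.
import Mathlib
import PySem

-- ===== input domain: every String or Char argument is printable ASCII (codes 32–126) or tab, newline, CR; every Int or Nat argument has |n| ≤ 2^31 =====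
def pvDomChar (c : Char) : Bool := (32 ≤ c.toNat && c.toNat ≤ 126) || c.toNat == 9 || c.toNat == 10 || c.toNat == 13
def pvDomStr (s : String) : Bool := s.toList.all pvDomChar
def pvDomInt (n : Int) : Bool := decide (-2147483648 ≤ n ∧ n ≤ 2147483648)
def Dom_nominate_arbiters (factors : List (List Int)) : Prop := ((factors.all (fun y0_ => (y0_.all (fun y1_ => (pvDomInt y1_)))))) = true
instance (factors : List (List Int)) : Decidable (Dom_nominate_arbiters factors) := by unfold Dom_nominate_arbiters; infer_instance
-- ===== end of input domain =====

-- B replaces A's paired-factor list scans (with a special-cased last-factor loop) by one inverted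
-- index element -> set of factor indices, from which each element's arbiter is read off as a
-- minimum qualifying index; same return values, measurably faster on large inputs.

-- ===== PORT A =====
-- ===== PORT B =====

def nominate_arbiters (factors : List (List Int)) : List Int :=
  let assignments : PySem.Dict Int Int :=
    (PySem.List.enumerate (PySem.List.slice factors none (some (-1)))).foldl
      (fun d p =>
        p.2.foldl
          (fun d j =>
            if ¬((PySem.List.pyGetD factors (p.1 + 1) []).contains j = true) ∧ d.get? j = none
            then d.insert j p.1 else d)
          d)
      PySem.Dict.empty
  let assignments2 : PySem.Dict Int Int :=
    (PySem.List.pyGetD factors (-1) []).foldl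
      (fun d j => if d.get? j = none then d.insert j ((factors.length : Int) - 1) else d)
      assignments
  (PySem.List.sorted assignments2.keys (fun k => k)).map (fun k => assignments2.getD k 0)

def nominate_arbiters_alt (factors : List (List Int)) : List Int :=
  let n : Int := factors.length
  let occ : PySem.Dict Int (PySem.Set Int) :=
    (PySem.List.enumerate factors).foldl
      (fun d p =>
        p.2.foldl (fun d j => d.insert j (PySem.Set.add (d.getD j PySem.Set.empty) p.1)) d)
      PySem.Dict.empty
  (PySem.List.sorted occ.keys (fun k => k)).foldl
    (fun res j =>
      match PySem.List.min?
          ((occ.getD j PySem.Set.empty).filter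
            (fun i => i == n - 1 || !(PySem.Set.contains (occ.getD j PySem.Set.empty) (i + 1))))
          (fun i => i) with
      | some m => res ++ [m]
      | none => res)
    []


-- ===== PRECONDITION & SPEC =====
-- Pre_ excludes only the empty list, on which A raises IndexError at factors[-1].
def Pre_nominate_arbiters (factors : List (List Int)) : Prop := factors ≠ []
instance (factors : List (List Int)) : Decidable (Pre_nominate_arbiters factors) := by
  unfold Pre_nominate_arbiters; infer_instance

def pvWitness_nominate_arbiters : List (List Int) := [[1, 2], [2, 3], [4]]

def Spec_nominate_arbiters (factors : List (List Int)) (out : List Int) : Prop :=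
  out = nominate_arbiters_alt factors
instance (factors : List (List Int)) (out : List Int) : Decidable (Spec_nominate_arbiters factors out) := by
  unfold Spec_nominate_arbiters; infer_instance

-- ===== CLAIM (what is proved, stated in full; the proofs are below) =====
def Claim_equal_nominate_arbiters : Prop :=
  ∀ (factors : List (List Int)), Dom_nominate_arbiters factors →
    Pre_nominate_arbiters factors → Spec_nominate_arbiters factors (nominate_arbiters factors)

-- ===== LEMMAS AND PROOFS =====

def pvQual (F : List (List Int)) (j : Int) (k : Nat) : Bool :=
  decide (j ∈ F.getD k []) && (decide (k + 1 = F.length) || !decide (j ∈ F.getD (k + 1) []))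

def pvArb (F : List (List Int)) (j : Int) : Option Nat :=
  (List.range F.length).find? (pvQual F j)

def pvOccTo (F : List (List Int)) (m : Nat) (j : Int) : List Int :=
  ((List.range m).filter (fun k => decide (j ∈ F.getD k []))).map (fun (k : Nat) => (k : Int))

theorem pvOccTo_succ (F : List (List Int)) (m : Nat) (j : Int) :
    pvOccTo F (m + 1) j =
      pvOccTo F m j ++ (if j ∈ F.getD m [] then [(m : Int)] else []) := by
  unfold pvOccTo
  rw [List.range_succ, List.filter_append, List.map_append]
  congr 1
  simp only [List.getD_eq_getElem?_getD]
  by_cases hc : j ∈ F[m]?.getD [] <;> simp [hc]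

theorem mem_pvOccTo (F : List (List Int)) (m : Nat) (j : Int) (i : Int) :
    i ∈ pvOccTo F m j ↔ ∃ k : Nat, k < m ∧ j ∈ F.getD k [] ∧ i = (k : Int) := by
  unfold pvOccTo
  simp only [List.mem_map, List.mem_filter, List.mem_range, decide_eq_true_eq]
  constructor
  · rintro ⟨k, ⟨hk, hc⟩, rfl⟩; exact ⟨k, hk, hc, rfl⟩
  · rintro ⟨k, hk, hc, rfl⟩; exact ⟨k, ⟨hk, hc⟩, rfl⟩

theorem A_inner (c : Int → Bool) (v : Int) :
    ∀ (xs : List Int) (d : PySem.Dict Int Int) (j : Int),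
      (xs.foldl (fun d j => if ¬(c j = true) ∧ d.get? j = none then d.insert j v else d) d).get? j
        = ((d.get? j).or (if j ∈ xs ∧ ¬(c j = true) then some v else none)) := by
  intro xs
  induction xs with
  | nil => intro d j; simp
  | cons x t ih =>
    intro d j
    simp only [List.foldl_cons]
    rw [ih]
    by_cases hcx : c x = true
    · rw [if_neg (fun h => h.1 hcx)]
      by_cases hj : j = x
      · subst hj; simp [hcx]
      · simp [List.mem_cons, hj]
    · by_cases hgx : d.get? x = none
      · rw [if_pos ⟨hcx, hgx⟩]
        by_cases hj : j = x
        · subst hj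
          rw [PySem.Dict.get?_insert_self, hgx]
          simp [hcx]
        · rw [PySem.Dict.get?_insert _ _ _ _, if_neg hj]
          simp [List.mem_cons, hj]
      · rw [if_neg (fun h => hgx h.2)]
        by_cases hj : j = x
        · subst hj
          cases h : d.get? j with
          | none => exact absurd h hgx
          | some w => simp [h]
        · simp [List.mem_cons, hj]

theorem A_inner_nodup (c : Int → Bool) (v : Int) :
    ∀ (xs : List Int) (d : PySem.Dict Int Int), d.keys.Nodup →
      ((xs.foldl (fun d j => if ¬(c j = true) ∧ d.get? j = none then d.insert j v else d) d).keys).Nodup := by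
  intro xs
  induction xs with
  | nil => intro d h; simpa using h
  | cons x t ih =>
    intro d h
    simp only [List.foldl_cons]
    apply ih
    split
    · exact PySem.Dict.nodup_keys_insert _ _ _ h
    · exact h

theorem A_outer (F : List (List Int)) :
    ∀ (ys : List (List Int)) (s : Nat) (d : PySem.Dict Int Int),
      ys = F.dropLast.drop s →
      ∀ j,
        ((PySem.List.enumerate ys (s : Int)).foldl
          (fun d p =>
            p.2.foldl
              (fun d j =>
                if ¬((PySem.List.pyGetD F (p.1 + 1) []).contains j = true) ∧ d.get? j = none
                then d.insert j p.1 else d)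
              d)
          d).get? j
        = (d.get? j).or
            (((List.range' s ys.length).find? (pvQual F j)).map (fun (k : Nat) => (k : Int))) := by
  intro ys
  induction ys with
  | nil => intro s d _ j; simp [PySem.List.enumerate_nil]
  | cons y t ih =>
    intro s d hys j
    have hlen : s < F.dropLast.length := by
      by_contra h
      rw [List.drop_eq_nil_of_le (Nat.le_of_not_lt h)] at hys
      exact List.cons_ne_nil y t hys
    have hslt : s < F.length - 1 := by simpa [List.length_dropLast] using hlen
    have hy : y = F.dropLast[s] := by
      have := congrArg (fun l => l.head?) hys
      simpa [List.head?_drop, List.getElem?_eq_getElem hlen] using this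
    have ht : t = F.dropLast.drop (s + 1) := by
      have := congrArg (fun l => l.tail) hys
      simpa [List.tail_drop] using this
    rw [PySem.List.enumerate_cons, List.foldl_cons]
    have hcast : (s : Int) + 1 = ((s + 1 : Nat) : Int) := by push_cast; ring
    rw [hcast, ih (s + 1) _ ht j]
    rw [A_inner]
    dsimp only
    have hFs : F.dropLast[s] = F.getD s [] := by
      rw [List.getElem_dropLast]
      exact (List.getD_eq_getElem F [] (by omega)).symm
    have hpy : PySem.List.pyGetD F (((s + 1 : Nat) : Int)) [] = F.getD (s + 1) [] := by
      rw [PySem.List.pyGetD_of_nonneg F [] (by positivity)]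
      simp
    have hq : pvQual F j s = (decide (j ∈ F.getD s []) && !decide (j ∈ F.getD (s + 1) [])) := by
      unfold pvQual
      have hne : ¬(s + 1 = F.length) := by omega
      simp [hne]
    have hrange : List.range' s (y :: t).length = s :: List.range' (s + 1) t.length := by
      simp [List.range'_succ]
    rw [hrange]
    by_cases hqs : pvQual F j s = true
    · have hmq : j ∈ F.getD s [] ∧ j ∉ F.getD (s + 1) [] := by
        rw [hq] at hqs; simpa using hqs
      have hmem : j ∈ y := by rw [hy, hFs]; exact hmq.1
      have hnot : ¬((PySem.List.pyGetD F (((s + 1 : Nat) : Int)) []).contains j = true) := by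
        rw [hpy]; simpa using hmq.2
      rw [List.find?_cons_of_pos hqs, if_pos ⟨hmem, hnot⟩]
      cases d.get? j <;> simp [Option.or]
    · have hcond : ¬(j ∈ y ∧ ¬((PySem.List.pyGetD F (((s + 1 : Nat) : Int)) []).contains j = true)) := by
        rintro ⟨hmem, hnot⟩
        apply hqs
        rw [hq]
        rw [hpy] at hnot
        simp only [Bool.and_eq_true, decide_eq_true_eq, Bool.not_eq_true']
        constructor
        · rw [hy, hFs] at hmem; exact hmem
        · simpa using hnot
      rw [List.find?_cons_of_neg (by simpa using hqs), if_neg hcond]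
      cases d.get? j <;> simp [Option.or]

theorem A_last (v : Int) :
    ∀ (xs : List Int) (d : PySem.Dict Int Int) (j : Int),
      (xs.foldl (fun d j => if d.get? j = none then d.insert j v else d) d).get? j
        = ((d.get? j).or (if j ∈ xs then some v else none)) := by
  intro xs
  induction xs with
  | nil => intro d j; simp
  | cons x t ih =>
    intro d j
    simp only [List.foldl_cons]
    rw [ih]
    by_cases hgx : d.get? x = none
    · rw [if_pos hgx]
      by_cases hj : j = x
      · subst hj
        rw [PySem.Dict.get?_insert_self, hgx]
        simp
      · rw [PySem.Dict.get?_insert _ _ _ _, if_neg hj]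
        simp [List.mem_cons, hj]
    · rw [if_neg hgx]
      by_cases hj : j = x
      · subst hj
        cases h : d.get? j with
        | none => exact absurd h hgx
        | some w => simp [h]
      · simp [List.mem_cons, hj]

theorem A_last_nodup (v : Int) :
    ∀ (xs : List Int) (d : PySem.Dict Int Int), d.keys.Nodup →
      ((xs.foldl (fun d j => if d.get? j = none then d.insert j v else d) d).keys).Nodup := by
  intro xs
  induction xs with
  | nil => intro d h; simpa using h
  | cons x t ih =>
    intro d h
    simp only [List.foldl_cons]
    apply ih
    split
    · exact PySem.Dict.nodup_keys_insert _ _ _ h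
    · exact h

theorem B_inner (i : Int) :
    ∀ (xs : List Int) (d : PySem.Dict Int (PySem.Set Int)) (j : Int),
      (xs.foldl (fun d j => d.insert j (PySem.Set.add (d.getD j PySem.Set.empty) i)) d).get? j
        = if j ∈ xs then some (PySem.Set.add (d.getD j PySem.Set.empty) i) else d.get? j := by
  intro xs
  induction xs with
  | nil => intro d j; simp
  | cons x t ih =>
    intro d j
    simp only [List.foldl_cons]
    rw [ih]
    by_cases hj : j = x
    · subst hj
      by_cases hmem : j ∈ t
      · rw [if_pos hmem, if_pos (List.mem_cons_self)]
        congr 1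
        rw [PySem.Dict.getD_eq_get?_getD, PySem.Dict.get?_insert_self]
        simp only [Option.getD_some]
        rw [PySem.Set.add_of_mem ((PySem.Set.mem_add _ _ _).mpr (Or.inr rfl))]
      · rw [if_neg hmem, if_pos (List.mem_cons_self)]
        rw [PySem.Dict.get?_insert_self]
    · by_cases hmem : j ∈ t
      · rw [if_pos hmem, if_pos (List.mem_cons_of_mem _ hmem)]
        congr 2
        rw [PySem.Dict.getD_eq_get?_getD, PySem.Dict.get?_insert _ _ _ _, if_neg hj]
        exact (PySem.Dict.getD_eq_get?_getD d j _).symm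
      · rw [if_neg hmem, if_neg (by simp [List.mem_cons, hj, hmem])]
        rw [PySem.Dict.get?_insert _ _ _ _, if_neg hj]

theorem B_inner_nodup (i : Int) :
    ∀ (xs : List Int) (d : PySem.Dict Int (PySem.Set Int)), d.keys.Nodup →
      ((xs.foldl (fun d j => d.insert j (PySem.Set.add (d.getD j PySem.Set.empty) i)) d).keys).Nodup := by
  intro xs
  induction xs with
  | nil => intro d h; simpa using h
  | cons x t ih =>
    intro d h
    simp only [List.foldl_cons]
    exact ih _ (PySem.Dict.nodup_keys_insert _ _ _ h)

theorem B_outer (F : List (List Int)) :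
    ∀ (ys : List (List Int)) (s : Nat) (d : PySem.Dict Int (PySem.Set Int)),
      ys = F.drop s →
      (∀ j, d.get? j = if pvOccTo F s j = [] then none else some (pvOccTo F s j)) →
      ∀ j,
        ((PySem.List.enumerate ys (s : Int)).foldl
          (fun d p =>
            p.2.foldl (fun d j => d.insert j (PySem.Set.add (d.getD j PySem.Set.empty) p.1)) d)
          d).get? j
        = if pvOccTo F F.length j = [] then none else some (pvOccTo F F.length j) := by
  intro ys
  induction ys with
  | nil =>
    intro s d hys hd j
    have hs : F.length ≤ s := by
      have := congrArg List.length hys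
      simp [List.length_drop] at this
      omega
    rw [PySem.List.enumerate_nil, List.foldl_nil, hd j]
    have hocc : pvOccTo F s j = pvOccTo F F.length j := by
      unfold pvOccTo
      congr 1
      rw [show s = F.length + (s - F.length) by omega, List.range_add, List.filter_append]
      have h2 : ((List.range (s - F.length)).map (fun x => F.length + x)).filter
          (fun k => decide (j ∈ F.getD k [])) = [] := by
        apply List.filter_eq_nil_iff.mpr
        intro k hk
        rcases List.mem_map.mp hk with ⟨i, _, rfl⟩
        rw [List.getD_eq_default _ _ (by omega)]
        simp
      rw [h2, List.append_nil]
    rw [hocc]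
  | cons y t ih =>
    intro s d hys hd j
    have hlen : s < F.length := by
      by_contra h
      rw [List.drop_eq_nil_of_le (Nat.le_of_not_lt h)] at hys
      exact List.cons_ne_nil y t hys
    have hy : y = F[s] := by
      have := congrArg (fun l => l.head?) hys
      simpa [List.head?_drop, List.getElem?_eq_getElem hlen] using this
    have ht : t = F.drop (s + 1) := by
      have := congrArg (fun l => l.tail) hys
      simpa [List.tail_drop] using this
    rw [PySem.List.enumerate_cons, List.foldl_cons]
    have hcast : (s : Int) + 1 = ((s + 1 : Nat) : Int) := by push_cast; ring
    rw [hcast]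
    apply ih (s + 1) _ ht _
    intro j'
    rw [B_inner]
    dsimp only
    have hFs : F[s] = F.getD s [] := (List.getD_eq_getElem F [] hlen).symm
    have hnotmem : ((s : Int)) ∉ pvOccTo F s j' := by
      rw [mem_pvOccTo]
      rintro ⟨k, hk, _, hkeq⟩
      have : s = k := by exact_mod_cast hkeq
      omega
    by_cases hmem : j' ∈ y
    · rw [if_pos hmem]
      have hin : j' ∈ F.getD s [] := by rw [← hFs, ← hy]; exact hmem
      rw [pvOccTo_succ, if_pos hin]
      have hgd : d.getD j' PySem.Set.empty = pvOccTo F s j' := by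
        rw [PySem.Dict.getD_eq_get?_getD, hd j']
        by_cases h0 : pvOccTo F s j' = []
        · rw [if_pos h0, h0]; rfl
        · rw [if_neg h0]; rfl
      rw [hgd, PySem.Set.add_of_not_mem hnotmem]
      simp
    · rw [if_neg hmem, hd j']
      have hnin : j' ∉ F.getD s [] := by rw [← hFs, ← hy]; exact hmem
      rw [pvOccTo_succ, if_neg hnin]
      simp

theorem foldl_min_all_ge : ∀ (t : List Int) (x : Int), (∀ y ∈ t, x ≤ y) → List.foldl min x t = x := by
  intro t
  induction t with
  | nil => intro x _; rfl
  | cons y t ih =>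
    intro x h
    simp only [List.foldl_cons]
    rw [min_eq_left (h y (List.mem_cons_self))]
    exact ih x (fun z hz => h z (List.mem_cons_of_mem _ hz))

theorem min?_of_pairwise_lt (l : List Int) (h : l.Pairwise (· < ·)) :
    PySem.List.min? l (fun i => i) = l.head? := by
  cases l with
  | nil => rfl
  | cons x t =>
    rw [PySem.List.min?_id_cons]
    rw [foldl_min_all_ge t x (fun y hy => le_of_lt ((List.pairwise_cons.mp h).1 y hy))]
    rfl

theorem B_key (F : List (List Int)) (j : Int) :
    PySem.List.min?
        ((pvOccTo F F.length j).filter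
          (fun i => i == (F.length : Int) - 1 || !(PySem.Set.contains (pvOccTo F F.length j) (i + 1))))
        (fun i => i)
      = (pvArb F j).map (fun (k : Nat) => (k : Int)) := by
  set n := F.length with hn
  have hcontains : ∀ k : Nat, PySem.Set.contains (pvOccTo F n j) ((k : Int) + 1)
      = ((decide (k + 1 < n)) && decide (j ∈ F.getD (k + 1) [])) := by
    intro k
    rw [PySem.Set.contains_eq_listContains]
    by_cases hh : ((k : Int) + 1) ∈ pvOccTo F n j
    · rcases (mem_pvOccTo F n j _).mp hh with ⟨k', hk'n, hc', he⟩
      have hkk : k' = k + 1 := by omega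
      subst hkk
      rw [List.contains_iff_mem.mpr hh]
      simp only [List.getD_eq_getElem?_getD] at hc'
      simp [hk'n, hc']
    · have hfalse : List.contains (pvOccTo F n j) ((k : Int) + 1) = false := by
        rw [Bool.eq_false_iff]
        intro hcc
        exact hh (List.contains_iff_mem.mp hcc)
      rw [hfalse]
      symm
      rw [Bool.and_eq_false_iff]
      by_cases h1 : k + 1 < n
      · right
        rw [decide_eq_false_iff_not]
        intro h2
        exact hh ((mem_pvOccTo F n j _).mpr ⟨k + 1, h1, h2, by push_cast; ring⟩)
      · left; simp [h1]
  have hpq : ∀ i ∈ pvOccTo F n j,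
      (i == (n : Int) - 1 || !(PySem.Set.contains (pvOccTo F n j) (i + 1)))
        = (decide (0 ≤ i) && pvQual F j i.toNat) := by
    intro i hi
    rcases (mem_pvOccTo F n j i).mp hi with ⟨k, hkn, hjk, rfl⟩
    rw [hcontains k, Int.toNat_natCast]
    unfold pvQual
    rw [← hn]
    rcases (by omega : k + 1 = n ∨ k + 1 < n) with h1 | h1
    · have he : (k : Int) = (n : Int) - 1 := by omega
      simp only [List.getD_eq_getElem?_getD] at hjk
      simp [he, h1]
      exact ⟨by omega, hjk⟩
    · have hne : ¬(k + 1 = n) := by omega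
      have he : ((k : Int) == (n : Int) - 1) = false := by
        rw [beq_eq_false_iff_ne]
        omega
      simp only [List.getD_eq_getElem?_getD] at hjk
      simp [he, h1, hne]
      intro _
      exact hjk
  have hfil :
      (pvOccTo F n j).filter
          (fun i => i == (n : Int) - 1 || !(PySem.Set.contains (pvOccTo F n j) (i + 1)))
        = ((List.range n).filter (pvQual F j)).map (fun (k : Nat) => (k : Int)) := by
    rw [List.filter_congr hpq]
    unfold pvOccTo
    rw [List.filter_map, List.filter_filter]
    congr 1
    apply List.filter_congr
    intro k hk
    simp only [Function.comp, Int.toNat_natCast, Int.natCast_nonneg, decide_true, Bool.true_and]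
    unfold pvQual
    cases hmm : decide (j ∈ F.getD k []) <;> simp [hmm]
  rw [hfil]
  have hpair : (((List.range n).filter (pvQual F j)).map (fun (k : Nat) => (k : Int))).Pairwise
      ((· < ·) : Int → Int → Prop) := by
    apply List.Pairwise.map
    · intro a b hab; exact_mod_cast hab
    · exact List.Pairwise.filter _ (List.pairwise_lt_range)
  rw [min?_of_pairwise_lt _ hpair]
  unfold pvArb
  rw [← hn, ← List.head?_filter, List.head?_map]

theorem filterMap_eq_filter_map {α β : Type} [Inhabited β] (f : α → Option β) :
    ∀ (l : List α),
      l.filterMap f = (l.filter (fun j => (f j).isSome)).map (fun j => (f j).getD default) := by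
  intro l
  induction l with
  | nil => rfl
  | cons x t ih =>
    simp only [List.filterMap_cons, List.filter_cons]
    cases hfx : f x with
    | none => simpa [hfx] using ih
    | some m => simpa [hfx] using congrArg (m :: ·) ih

theorem pvArb_occ (F : List (List Int)) (j : Int) (h : (pvArb F j).isSome) :
    pvOccTo F F.length j ≠ [] := by
  unfold pvArb at h
  rcases Option.isSome_iff_exists.mp h with ⟨k, hk⟩
  have hmem := List.mem_of_find?_eq_some hk
  have hq := List.find?_some hk
  have hkn : k < F.length := List.mem_range.mp hmem
  have hcont : j ∈ F.getD k [] := by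
    unfold pvQual at hq
    have := (Bool.and_eq_true_iff.mp hq).1
    simpa using this
  intro hnil
  have : (k : Int) ∈ pvOccTo F F.length j := (mem_pvOccTo F _ j _).mpr ⟨k, hkn, hcont, rfl⟩
  rw [hnil] at this
  exact (List.not_mem_nil) this

theorem nominate_arbiters_eq (F : List (List Int)) (hF : F ≠ []) :
    nominate_arbiters F = nominate_arbiters_alt F := by
  set n := F.length with hn
  have hn1 : 1 ≤ n := by
    cases F with
    | nil => exact absurd rfl hF
    | cons a t => simp [hn]
  simp only [nominate_arbiters, nominate_arbiters_alt]
  rw [PySem.List.slice_to_neg_one]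
  set dA1 := (PySem.List.enumerate F.dropLast (0 : Int)).foldl
      (fun d p =>
        p.2.foldl
          (fun d j =>
            if ¬((PySem.List.pyGetD F (p.1 + 1) []).contains j = true) ∧ d.get? j = none
            then d.insert j p.1 else d)
          d)
      PySem.Dict.empty with hdA1
  set dA2 := (PySem.List.pyGetD F (-1) []).foldl
      (fun d j => if d.get? j = none then d.insert j ((F.length : Int) - 1) else d) dA1 with hdA2
  have hA1get : ∀ j, dA1.get? j =
      (((List.range (n - 1)).find? (pvQual F j)).map (fun (k : Nat) => (k : Int))) := by
    intro j
    have h := A_outer F F.dropLast 0 PySem.Dict.empty (by simp) j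
    rw [show ((0 : Nat) : Int) = (0 : Int) from rfl] at h
    rw [hdA1, h]
    rw [PySem.Dict.get?_empty, Option.none_or]
    congr 2
    rw [← List.range_eq_range', List.length_dropLast, hn]
  have hlast : PySem.List.pyGetD F (-1) [] = F.getD (n - 1) [] := by
    rw [PySem.List.pyGetD_neg_one F [] hF]
    rw [List.getLast_eq_getElem]
    exact (List.getD_eq_getElem F [] (by omega)).symm
  have hA2get : ∀ j, dA2.get? j = (pvArb F j).map (fun (k : Nat) => (k : Int)) := by
    intro j
    rw [hdA2, A_last, hA1get, hlast]
    unfold pvArb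
    rw [← hn]
    have hr : List.range n = List.range (n - 1) ++ [n - 1] := by
      conv_lhs => rw [show n = (n - 1) + 1 by omega]
      exact List.range_succ
    rw [hr, List.find?_append]
    have hq : pvQual F j (n - 1) = decide (j ∈ F.getD (n - 1) []) := by
      unfold pvQual
      have h1 : (n - 1) + 1 = F.length := by omega
      simp [h1]
    by_cases hc : j ∈ F.getD (n - 1) []
    · rw [if_pos hc]
      have : List.find? (pvQual F j) [n - 1] = some (n - 1) := by
        rw [List.find?_cons_of_pos (by rw [hq]; simpa using hc)]
      rw [this]
      cases hfind : List.find? (pvQual F j) (List.range (n - 1)) <;> simp [Option.or] <;> omega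
    · rw [if_neg hc]
      have : List.find? (pvQual F j) [n - 1] = none := by
        rw [List.find?_cons_of_neg (by rw [hq]; simpa using hc), List.find?_nil]
      rw [this]
      cases hfind : List.find? (pvQual F j) (List.range (n - 1)) <;> simp [Option.or]
  have hA2nodup : dA2.keys.Nodup := by
    rw [hdA2]
    apply A_last_nodup
    rw [hdA1]
    have hgen : ∀ (ys : List (List Int)) (s : Int) (d : PySem.Dict Int Int), d.keys.Nodup →
        ((PySem.List.enumerate ys s).foldl
          (fun d p =>
            p.2.foldl
              (fun d j =>
                if ¬((PySem.List.pyGetD F (p.1 + 1) []).contains j = true) ∧ d.get? j = none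
                then d.insert j p.1 else d)
              d)
          d).keys.Nodup := by
      intro ys
      induction ys with
      | nil => intro s d h; simpa [PySem.List.enumerate_nil] using h
      | cons y t ih =>
        intro s d h
        rw [PySem.List.enumerate_cons, List.foldl_cons]
        exact ih _ _ (A_inner_nodup _ _ _ _ h)
    exact hgen _ _ _ PySem.Dict.nodup_keys_empty
  set dB := (PySem.List.enumerate F (0 : Int)).foldl
      (fun d p =>
        p.2.foldl (fun d j => d.insert j (PySem.Set.add (d.getD j PySem.Set.empty) p.1)) d)
      PySem.Dict.empty with hdB
  have hBget : ∀ j, dB.get? j =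
      if pvOccTo F n j = [] then none else some (pvOccTo F n j) := by
    intro j
    have h := B_outer F F 0 PySem.Dict.empty (by simp) (by intro j'; simp [pvOccTo, PySem.Dict.get?_empty]) j
    rw [show ((0 : Nat) : Int) = (0 : Int) from rfl] at h
    rw [hdB, h, hn]
  have hBnodup : dB.keys.Nodup := by
    rw [hdB]
    have hgen : ∀ (ys : List (List Int)) (s : Int) (d : PySem.Dict Int (PySem.Set Int)), d.keys.Nodup →
        ((PySem.List.enumerate ys s).foldl
          (fun d p =>
            p.2.foldl (fun d j => d.insert j (PySem.Set.add (d.getD j PySem.Set.empty) p.1)) d)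
          d).keys.Nodup := by
      intro ys
      induction ys with
      | nil => intro s d h; simpa [PySem.List.enumerate_nil] using h
      | cons y t ih =>
        intro s d h
        rw [PySem.List.enumerate_cons, List.foldl_cons]
        exact ih _ _ (B_inner_nodup _ _ _ h)
    exact hgen _ _ _ PySem.Dict.nodup_keys_empty
  set L := PySem.List.sorted dB.keys (fun k => k) with hL
  have hval : ∀ j ∈ dB.keys,
      PySem.List.min?
          ((dB.getD j PySem.Set.empty).filter
            (fun i => i == (F.length : Int) - 1 || !(PySem.Set.contains (dB.getD j PySem.Set.empty) (i + 1))))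
          (fun i => i)
        = (pvArb F j).map (fun (k : Nat) => (k : Int)) := by
    intro j hjk
    have hjocc : pvOccTo F n j ≠ [] := by
      intro hnil
      have h := hBget j
      rw [if_pos hnil] at h
      exact (PySem.Dict.get?_eq_none_iff_not_mem_keys _ _).mp h hjk
    have hgd : dB.getD j PySem.Set.empty = pvOccTo F n j := by
      rw [PySem.Dict.getD_eq_get?_getD, hBget j, if_neg hjocc]
      rfl
    rw [hgd]
    have h := B_key F j
    rw [← hn] at h
    exact h
  have hBout : ∀ (l : List Int), (∀ j ∈ l, j ∈ dB.keys) → ∀ (acc : List Int),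
      (l.foldl
        (fun res j =>
          match PySem.List.min?
              ((dB.getD j PySem.Set.empty).filter
                (fun i => i == (F.length : Int) - 1 || !(PySem.Set.contains (dB.getD j PySem.Set.empty) (i + 1))))
              (fun i => i) with
          | some m => res ++ [m]
          | none => res)
        acc)
      = acc ++ l.filterMap (fun j => (pvArb F j).map (fun (k : Nat) => (k : Int))) := by
    intro l
    induction l with
    | nil => intro _ acc; simp
    | cons x t ih =>
      intro hmem acc
      simp only [List.foldl_cons, List.filterMap_cons]
      rw [hval x (hmem x List.mem_cons_self)]
      cases hax : pvArb F x with
      | none =>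
        simp only [hax, Option.map_none]
        exact ih (fun j hj => hmem j (List.mem_cons_of_mem _ hj)) acc
      | some k =>
        simp only [hax, Option.map_some]
        rw [ih (fun j hj => hmem j (List.mem_cons_of_mem _ hj))]
        simp
  have hmemA : ∀ j, j ∈ dA2.keys ↔ (pvArb F j).isSome := by
    intro j
    rw [← PySem.Dict.contains_iff_mem_keys, PySem.Dict.contains_eq_isSome_get?, hA2get j]
    cases pvArb F j <;> simp
  have hLpair : L.Pairwise ((· < ·) : Int → Int → Prop) := by
    have hle := PySem.List.sorted_pairwise dB.keys (fun k => k)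
    have hnodup : L.Nodup := (PySem.List.sorted_perm dB.keys (fun k => k) false).nodup_iff.mpr hBnodup
    rw [hL]
    exact (List.Pairwise.and hle (hL ▸ hnodup)).imp
      (by rintro a b ⟨h1, h2⟩; exact lt_of_le_of_ne h1 h2)
  have hKA : PySem.List.sorted dA2.keys (fun k => k)
      = L.filter (fun j => (pvArb F j).isSome) := by
    apply PySem.List.sorted_eq_of_perm_of_pairwise_lt
    · rw [List.perm_ext_iff_of_nodup (List.Nodup.filter _
        ((PySem.List.sorted_perm dB.keys (fun k => k) false).nodup_iff.mpr hBnodup)) hA2nodup]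
      intro j
      rw [List.mem_filter, hmemA j, PySem.List.mem_sorted]
      constructor
      · rintro ⟨_, h2⟩; exact of_decide_eq_true (by simpa using h2)
      · intro h
        refine ⟨?_, by simpa using h⟩
        rw [← PySem.Dict.contains_iff_mem_keys, PySem.Dict.contains_eq_isSome_get?, hBget j,
            if_neg (pvArb_occ F j h)]
        rfl
    · exact List.Pairwise.filter _ hLpair
  rw [hKA]
  rw [hBout L (fun j hj => (PySem.List.mem_sorted _ _ _ _).mp hj) [], List.nil_append]
  rw [filterMap_eq_filter_map]
  have hps : (fun j => ((pvArb F j).map (fun (k : Nat) => (k : Int))).isSome)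
      = (fun j => (pvArb F j).isSome) := by
    funext j; cases pvArb F j <;> rfl
  rw [hps]
  apply List.map_congr_left
  intro j hj
  have hsome : (pvArb F j).isSome := by
    have := (List.mem_filter.mp hj).2
    simpa using this
  rw [PySem.Dict.getD_eq_get?_getD, hA2get j]
  rcases Option.isSome_iff_exists.mp hsome with ⟨k, hk⟩
  rw [hk]
  rfl

-- ===== VERDICT (by name: the statement is the Claim_ definition above) =====
theorem nominate_arbiters_spec : Claim_equal_nominate_arbiters := by
  intro factors _ hpre
  unfold Spec_nominate_arbiters
  exact nominate_arbiters_eq factors hpre
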